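-- pv_equiv track=rewrite | github.com/jorlyf/ege-informatics | 22 задание/8.py | f
-- ===== SOURCE A (Python) =====
-- def f(x):
--     M = 1; L = 0
--     while x > 0:
--         M = M * (x%10)
--         if x % 10 > 5:
--             L = L + 1
--         x = x // 10
--     return L, M
-- ===== SOURCE B (Python) =====
-- def f(x):
--     digits = [int(c) for c in str(x)] if x > 0 else []
--     L = sum(1 for v in digits if v > 5)
--     M = 1
--     for v in digits:
--         M = M * v
--     return L, M
-- ===== Notes on version B (the rewrite author's own statement) =====
-- stated objective: idiomatic
-- what changed: B extracts the digit list once via str(x) string conversion instead of A's arithmetic %/// peeling loop, then computes the count and the product in two separate passes over the materialized list.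
import Mathlib
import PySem

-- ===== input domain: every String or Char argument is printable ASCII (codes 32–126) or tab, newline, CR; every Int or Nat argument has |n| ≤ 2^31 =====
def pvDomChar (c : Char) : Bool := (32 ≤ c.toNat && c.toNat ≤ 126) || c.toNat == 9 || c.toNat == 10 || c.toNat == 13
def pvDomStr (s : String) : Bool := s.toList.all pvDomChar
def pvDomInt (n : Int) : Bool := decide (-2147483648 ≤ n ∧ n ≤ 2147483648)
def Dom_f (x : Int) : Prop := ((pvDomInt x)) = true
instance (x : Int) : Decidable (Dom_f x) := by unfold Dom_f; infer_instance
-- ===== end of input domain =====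

-- B builds the digit list once via str(x) and takes count and product in two separate
-- passes, instead of A's arithmetic %/// peeling loop (objective: idiomatic; same cost).

-- ===== PORT A =====
-- the while loop of A as structural recursion on the same state (x, M, L)
def fLoopA (x M L : Int) : Int × Int :=
  if h : 0 < x then
    fLoopA (PySem.Int.floordiv x 10) (M * PySem.Int.mod x 10)
      (if PySem.Int.mod x 10 > 5 then L + 1 else L)
  else
    (L, M)
termination_by x.toNat
decreasing_by
  have hx' : x = ((x.toNat : Nat) : Int) := by omega
  have h1 : PySem.Int.floordiv x 10 = ((x.toNat / 10 : Nat) : Int) := by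
    rw [hx']; exact_mod_cast PySem.Int.floordiv_natCast x.toNat 10
  have h2 : x.toNat / 10 < x.toNat := Nat.div_lt_self (by omega) (by norm_num)
  omega

def f (x : Int) : Int × Int := fLoopA x 1 0

-- ===== PORT B =====
-- int(c) for a single character c; never raises on the digit characters of str(x)
def fCharVal (c : Char) : Int := (PySem.Int.ofStr? (String.ofList [c])).getD 0

def f_alt (x : Int) : Int × Int :=
  let digits : List Int :=
    if 0 < x then (PySem.Int.toStr x).toList.map fCharVal else []
  let L : Int := digits.foldl (fun a v => if v > 5 then a + 1 else a) 0
  let M : Int := digits.foldl (· * ·) 1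
  (L, M)

-- ===== PRECONDITION & SPEC =====
def Spec_f (x : Int) (out : Int × Int) : Prop := out = f_alt x
instance (x : Int) (out : Int × Int) : Decidable (Spec_f x out) := by unfold Spec_f; infer_instance

-- ===== CLAIM (what is proved, stated in full; the proofs are below) =====
def Claim_equal_f : Prop := ∀ (x : Int), Dom_f x → Spec_f x (f x)

-- ===== LEMMAS AND PROOFS =====

-- digits of n as Ints, most significant first, by well-founded recursion
def digitsRec (n : Nat) : List Char :=
  if _h : n < 10 then [Nat.digitChar n]
  else digitsRec (n / 10) ++ [Nat.digitChar (n % 10)]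
decreasing_by exact Nat.div_lt_self (by omega) (by norm_num)

lemma toDigitsCore_eq (fuel : Nat) : ∀ (n : Nat) (acc : List Char), n < fuel →
    Nat.toDigitsCore 10 fuel n acc = digitsRec n ++ acc := by
  induction fuel with
  | zero => intro n acc h; omega
  | succ f ih =>
    intro n acc h
    rw [Nat.toDigitsCore]
    by_cases h0 : n / 10 = 0
    · have hn : n < 10 := by omega
      simp only [h0, if_true]
      rw [digitsRec]
      simp [hn, Nat.mod_eq_of_lt hn]
    · have hn : ¬ n < 10 := by omega
      simp only [h0]
      rw [ih (n / 10) _ (by omega)]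
      conv_rhs => rw [digitsRec]
      simp [hn]

lemma toDigits_eq (n : Nat) : Nat.toDigits 10 n = digitsRec n := by
  have := toDigitsCore_eq (n + 1) n [] (by omega)
  simpa [Nat.toDigits] using this

lemma charVal_digitChar (d : Nat) (hd : d < 10) : fCharVal (Nat.digitChar d) = (d : Int) := by
  interval_cases d <;> decide

-- B's two folds, characterized
lemma foldl_cnt (D : List Int) : ∀ (a : Int),
    D.foldl (fun a v => if v > 5 then a + 1 else a) a
      = a + (D.countP (fun v => decide (v > 5)) : Int) := by
  induction D with
  | nil => intro a; simp
  | cons v D ih =>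
    intro a
    simp only [List.foldl_cons, List.countP_cons, ih]
    by_cases h : v > 5
    · simp [h]; ring
    · simp [h]

lemma foldl_prod (D : List Int) : ∀ (m : Int), D.foldl (· * ·) m = m * D.prod := by
  induction D with
  | nil => intro m; simp
  | cons v D ih => intro m; simp only [List.foldl_cons, ih, List.prod_cons]; ring

-- the Int digit list B traverses, as a function of n
def dInt (n : Nat) : List Int := (digitsRec n).map fCharVal

lemma dInt_eq (n : Nat) (hn : 0 < n) :
    dInt n = if n < 10 then [(n : Int)]
             else dInt (n / 10) ++ [((n % 10 : Nat) : Int)] := by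
  unfold dInt
  rw [digitsRec]
  split_ifs with h
  · simp [charVal_digitChar n h]
  · simp [charVal_digitChar (n % 10) (Nat.mod_lt _ (by norm_num))]

-- A's loop computes the count and product of the digit list
lemma loopA_eq (n : Nat) : 0 < n → ∀ (M L : Int),
    fLoopA (n : Int) M L
      = (L + ((dInt n).countP (fun v => decide (v > 5)) : Int), M * (dInt n).prod) := by
  induction n using Nat.strong_induction_on with
  | _ n ih =>
    intro hn M L
    rw [fLoopA]
    have hx : (0 : Int) < (n : Int) := by exact_mod_cast hn
    simp only [dif_pos hx]
    have hmod : PySem.Int.mod (n : Int) 10 = ((n % 10 : Nat) : Int) := by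
      exact_mod_cast PySem.Int.mod_natCast n 10
    have hdiv : PySem.Int.floordiv (n : Int) 10 = ((n / 10 : Nat) : Int) := by
      exact_mod_cast PySem.Int.floordiv_natCast n 10
    rw [hmod, hdiv]
    by_cases h10 : n < 10
    · have h0 : n / 10 = 0 := Nat.div_eq_of_lt h10
      have hm : n % 10 = n := Nat.mod_eq_of_lt h10
      rw [h0, hm]
      rw [fLoopA]
      simp only [dif_neg (by norm_num : ¬ (0:Int) < ((0:Nat):Int))]
      rw [dInt_eq n hn, if_pos h10]
      simp only [List.countP_cons, List.countP_nil, List.prod_cons, List.prod_nil,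
        Prod.mk.injEq]
      refine ⟨?_, by ring⟩
      simp only [decide_eq_true_eq]
      split_ifs <;> omega
    · have hdpos : 0 < n / 10 := Nat.div_pos (by omega) (by norm_num)
      rw [ih (n / 10) (Nat.div_lt_self hn (by norm_num)) hdpos]
      rw [dInt_eq n hn, if_neg h10]
      simp only [List.countP_append, List.countP_cons, List.countP_nil, List.prod_append,
        List.prod_cons, List.prod_nil, Prod.mk.injEq]
      refine ⟨?_, by ring⟩
      simp only [decide_eq_true_eq]
      split_ifs <;> push_cast <;> omega

theorem f_eq_f_alt (x : Int) : f x = f_alt x := by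
  unfold f f_alt
  by_cases hx : 0 < x
  · have hx' : x = ((x.toNat : Nat) : Int) := by omega
    have hnn : 0 < x.toNat := by omega
    have hdig : (PySem.Int.toStr x).toList.map fCharVal = dInt x.toNat := by
      rw [PySem.Int.toList_toStr]
      unfold PySem.Int.toChars
      rw [if_neg (by omega : ¬ x < 0), toDigits_eq]
      rfl
    simp only [if_pos hx, hdig]
    rw [foldl_cnt, foldl_prod]
    have hl := loopA_eq x.toNat hnn 1 0
    rw [← hx'] at hl
    rw [hl]
  · simp only [if_neg hx]
    rw [fLoopA, dif_neg hx]
    rfl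

-- ===== VERDICT (by name: the statement is the Claim_ definition above) =====
theorem f_spec : Claim_equal_f := by
  intro x _
  unfold Spec_f
  exact f_eq_f_alt x
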